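-- pv_equiv track=rewrite | github.com/dudamarlena/pyc_source | pycfiles/pyutil-3.3.0.tar/strutil.py | commonsuffix
-- ===== SOURCE A (Python) =====
-- def commonsuffix(l):
--     cp = []
--     for i in range(min(map(len, l))):
--         c = l[0][(-i - 1)]
--         for s in l[1:]:
--             if s[(-i - 1)] != c:
--                 cp.reverse()
--                 return ('').join(cp)
--
--         cp.append(c)
--
--     cp.reverse()
--     return ('').join(cp)
-- ===== SOURCE B (Python) =====
-- def commonsuffix(l):
--     rev = [s[::-1] for s in l]
--     lo = min(rev)
--     hi = max(rev)
--     i = 0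
--     while i < len(lo) and i < len(hi) and lo[i] == hi[i]:
--         i += 1
--     return lo[:i][::-1]
-- ===== Notes on version B (the rewrite author's own statement) =====
-- stated objective: alternative
-- what changed: Instead of scanning every string at each suffix position, B reverses the strings, takes the lexicographic min and max, and walks their common prefix once (common prefix of all = common prefix of the two lexicographic extremes), reversing it back at the end.
import Mathlib
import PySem

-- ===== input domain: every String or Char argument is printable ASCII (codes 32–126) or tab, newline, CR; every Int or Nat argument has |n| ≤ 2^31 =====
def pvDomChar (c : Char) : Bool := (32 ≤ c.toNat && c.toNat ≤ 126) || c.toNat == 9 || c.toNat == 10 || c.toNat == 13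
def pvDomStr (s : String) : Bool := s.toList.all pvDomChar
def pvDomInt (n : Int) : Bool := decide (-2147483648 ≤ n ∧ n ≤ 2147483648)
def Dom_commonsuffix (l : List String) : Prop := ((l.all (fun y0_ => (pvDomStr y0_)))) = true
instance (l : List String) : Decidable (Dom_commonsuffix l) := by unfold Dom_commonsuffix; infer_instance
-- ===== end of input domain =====

-- B replaces A's all-strings scan per position by the classic "common prefix of the
-- lexicographic min and max of the reversed strings" trick (objective: alternative algorithm).


-- ===== PORT A =====
-- outer 'for i in range(m)' with the early 'return' on a mismatch; cp.append then cp.reverse at exit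
def commonsuffixLoop (l0 : List Char) (rest : List (List Char)) : Nat → Nat → List Char → List Char
  | 0, _, cp => cp.reverse
  | fuel+1, i, cp =>
    match PySem.List.pyGet? l0 (-(i : Int) - 1) with
    | none => cp.reverse        -- unreachable when i < min(len): Python would raise IndexError
    | some c =>
      if rest.all (fun s => PySem.List.pyGet? s (-(i : Int) - 1) == some c) then
        commonsuffixLoop l0 rest fuel (i+1) (cp ++ [c])
      else cp.reverse

def commonsuffix (l : List String) : String :=
  match l with
  | [] => ""                    -- Python: min() of an empty sequence raises ValueError; excluded by Pre_
  | s0 :: rest =>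
    let m := (PySem.List.min? ((s0 :: rest).map (fun s => s.toList.length)) (fun x => x)).getD 0
    String.ofList (commonsuffixLoop s0.toList (rest.map (fun s => s.toList)) m 0 [])

-- ===== PORT B =====
-- 'while i < len(lo) and i < len(hi) and lo[i] == hi[i]: i += 1' (in-range indexing = getElem?)
def commonsuffixAltLoop (lo hi : List Char) (i : Nat) : Nat :=
  if h : i < lo.length ∧ i < hi.length ∧ lo[i]? = hi[i]? then
    commonsuffixAltLoop lo hi (i+1)
  else i
termination_by lo.length - i
decreasing_by omega

def commonsuffix_alt (l : List String) : String :=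
  match l with
  | [] => ""                    -- Python: min() of an empty sequence raises ValueError; excluded by Pre_
  | s0 :: rest =>
    let rev := (s0 :: rest).map (fun s => (PySem.Str.slice? s none none (-1)).getD "")  -- s[::-1]
    let lo := (PySem.List.min? rev (fun x => x)).getD ""
    let hi := (PySem.List.max? rev (fun x => x)).getD ""
    let i := commonsuffixAltLoop lo.toList hi.toList 0
    String.ofList ((lo.toList.take i).reverse)                                          -- lo[:i][::-1]

-- ===== PRECONDITION & SPEC =====
-- Pre_ excludes only the empty list, on which Python A raises ValueError (min() of an empty sequence).
def Pre_commonsuffix (l : List String) : Prop := l ≠ []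
instance (l : List String) : Decidable (Pre_commonsuffix l) := by unfold Pre_commonsuffix; infer_instance
def pvWitness_commonsuffix : List String := ["oak ab", "scrub ab", "b"]
def Spec_commonsuffix (l : List String) (out : String) : Prop := out = commonsuffix_alt l
instance (l : List String) (out : String) : Decidable (Spec_commonsuffix l out) := by unfold Spec_commonsuffix; infer_instance

-- ===== CLAIM (what is proved, stated in full; the proofs are below) =====
def Claim_equal_commonsuffix : Prop := ∀ (l : List String), Dom_commonsuffix l → Pre_commonsuffix l → Spec_commonsuffix l (commonsuffix l)

-- ===== LEMMAS AND PROOFS =====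

-- reference notion: longest common prefix of two char lists, and its fold over a list
def lcp2 : List Char → List Char → List Char
  | a :: as, b :: bs => if a = b then a :: lcp2 as bs else []
  | _, _ => []

def lcpAll (x : List Char) (xs : List (List Char)) : List Char := xs.foldl lcp2 x

theorem lcp2_prefix_left : ∀ (a b : List Char), lcp2 a b <+: a := by
  intro a
  induction a with
  | nil => intro b; cases b <;> simp [lcp2]
  | cons c as ih =>
    intro b
    cases b with
    | nil => simp [lcp2]
    | cons d bs =>
      by_cases h : c = d
      · simpa [lcp2, h] using ih bs
      · simp [lcp2, h]

theorem lcp2_prefix_right : ∀ (a b : List Char), lcp2 a b <+: b := by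
  intro a
  induction a with
  | nil => intro b; cases b <;> simp [lcp2]
  | cons c as ih =>
    intro b
    cases b with
    | nil => simp [lcp2]
    | cons d bs =>
      by_cases h : c = d
      · subst h; simpa [lcp2] using ih bs
      · simp [lcp2, h]

theorem prefix_lcp2 : ∀ (p a b : List Char), p <+: a → p <+: b → p <+: lcp2 a b := by
  intro p
  induction p with
  | nil => intro a b _ _; exact List.nil_prefix
  | cons c p' ih =>
    intro a b h1 h2
    obtain ⟨a', rfl, ha⟩ : ∃ a', a = c :: a' ∧ p' <+: a' := by
      cases a with
      | nil => exact absurd h1 (by simp)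
      | cons x xs => obtain ⟨rfl, h⟩ := List.cons_prefix_cons.mp h1; exact ⟨xs, rfl, h⟩
    obtain ⟨b', rfl, hb⟩ : ∃ b', b = c :: b' ∧ p' <+: b' := by
      cases b with
      | nil => exact absurd h2 (by simp)
      | cons x xs => obtain ⟨rfl, h⟩ := List.cons_prefix_cons.mp h2; exact ⟨xs, rfl, h⟩
    have he : lcp2 (c :: a') (c :: b') = c :: lcp2 a' b' := by simp [lcp2]
    rw [he]
    exact List.cons_prefix_cons.mpr ⟨rfl, ih a' b' ha hb⟩

theorem lcp2_nil_right (a : List Char) : lcp2 a [] = [] := by cases a <;> rfl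

theorem lcpAll_prefix_left : ∀ (xs : List (List Char)) (x : List Char), lcpAll x xs <+: x := by
  intro xs
  induction xs with
  | nil => intro x; simp [lcpAll]
  | cons s xs ih =>
    intro x
    exact (ih (lcp2 x s)).trans (lcp2_prefix_left x s)

theorem lcpAll_prefix_mem : ∀ (xs : List (List Char)) (x s : List Char), s ∈ xs → lcpAll x xs <+: s := by
  intro xs
  induction xs with
  | nil => intro x s h; simp at h
  | cons t xs ih =>
    intro x s h
    rcases List.mem_cons.mp h with rfl | h
    · exact (lcpAll_prefix_left xs (lcp2 x s)).trans (lcp2_prefix_right x s)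
    · exact ih (lcp2 x t) s h

theorem prefix_lcpAll : ∀ (xs : List (List Char)) (x p : List Char),
    p <+: x → (∀ s ∈ xs, p <+: s) → p <+: lcpAll x xs := by
  intro xs
  induction xs with
  | nil => intro x p h _; simpa [lcpAll] using h
  | cons t xs ih =>
    intro x p h hall
    exact ih (lcp2 x t) p (prefix_lcp2 p x t h (hall t (by simp))) (fun s hs => hall s (by simp [hs]))

-- sandwich: a common prefix of the lexicographic extremes is a prefix of everything between them
theorem sandwich : ∀ (p lo hi s : List Char), p <+: lo → p <+: hi → lo ≤ s → s ≤ hi → p <+: s := by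
  intro p
  induction p with
  | nil => intros; exact List.nil_prefix
  | cons c p' ih =>
    intro lo hi s hp1 hp2 h1 h2
    obtain ⟨lo', rfl, hlo⟩ : ∃ lo', lo = c :: lo' ∧ p' <+: lo' := by
      cases lo with
      | nil => exact absurd hp1 (by simp)
      | cons x xs => obtain ⟨rfl, h⟩ := List.cons_prefix_cons.mp hp1; exact ⟨xs, rfl, h⟩
    obtain ⟨hi', rfl, hhi⟩ : ∃ hi', hi = c :: hi' ∧ p' <+: hi' := by
      cases hi with
      | nil => exact absurd hp2 (by simp)
      | cons x xs => obtain ⟨rfl, h⟩ := List.cons_prefix_cons.mp hp2; exact ⟨xs, rfl, h⟩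
    cases s with
    | nil =>
      rcases Std.le_iff_lt_or_eq.mp h1 with h | h
      · exact absurd h (List.not_lt_nil _)
      · simp at h
    | cons d s' =>
      have hd : c = d ∧ lo' ≤ s' := by
        rcases Std.le_iff_lt_or_eq.mp h1 with ha | ha
        · rcases List.cons_lt_cons_iff.mp ha with hb | ⟨rfl, hb⟩
          · rcases Std.le_iff_lt_or_eq.mp h2 with hc | hc
            · rcases List.cons_lt_cons_iff.mp hc with hd' | ⟨rfl, -⟩
              · exact absurd hd' (lt_asymm hb)
              · exact absurd hb (lt_irrefl _)
            · injection hc with hc1 hc2; exact absurd (hc1 ▸ hb) (lt_irrefl _)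
          · exact ⟨rfl, le_of_lt hb⟩
        · injection ha with ha1 ha2; exact ⟨ha1, le_of_eq ha2⟩
      obtain ⟨rfl, hlos⟩ := hd
      have hs' : s' ≤ hi' := by
        rcases Std.le_iff_lt_or_eq.mp h2 with ha | ha
        · rcases List.cons_lt_cons_iff.mp ha with hb | ⟨-, hb⟩
          · exact absurd hb (lt_irrefl _)
          · exact le_of_lt hb
        · injection ha with ha1 ha2; exact le_of_eq ha2
      exact List.cons_prefix_cons.mpr ⟨rfl, ih lo' hi' s' hlo hhi hlos hs'⟩

-- what A's outer loop collects, read on the reversed lists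
def collect (L : List Char) (Rs : List (List Char)) : Nat → Nat → List Char
  | 0, _ => []
  | fuel+1, i =>
    match L[i]? with
    | none => []
    | some c => if Rs.all (fun s => s[i]? == some c) then c :: collect L Rs fuel (i+1) else []

theorem pyGet?_neg_succ_reverse (xs : List Char) (i : Nat) :
    PySem.List.pyGet? xs (-(i : Int) - 1) = xs.reverse[i]? := by
  by_cases h : i < xs.length
  · have e : -(i : Int) - 1 = -((i+1 : Nat) : Int) := by push_cast; ring
    rw [e, PySem.List.pyGet?_neg_natCast xs (i+1) (by omega) (by omega),
      List.getElem?_reverse h]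
    congr 1
    omega
  · rw [List.getElem?_eq_none (l := xs.reverse) (by simp only [List.length_reverse]; omega),
      PySem.List.pyGet?_eq_none_iff]
    simp [PySem.Raise.InRange]
    omega

theorem commonsuffixLoop_eq (l0 : List Char) (rest : List (List Char)) :
    ∀ (fuel i : Nat) (cp : List Char),
      commonsuffixLoop l0 rest fuel i cp
        = (cp ++ collect l0.reverse (rest.map List.reverse) fuel i).reverse := by
  intro fuel
  induction fuel with
  | zero => intro i cp; simp [commonsuffixLoop, collect]
  | succ fuel ih =>
    intro i cp
    simp only [commonsuffixLoop, collect, pyGet?_neg_succ_reverse, List.all_map]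
    cases hL : l0.reverse[i]? with
    | none => simp
    | some c =>
      by_cases h : (rest.all fun s => s.reverse[i]? == some c) = true
      · have h' : ∀ x ∈ rest, x.reverse[i]? = some c := by simpa using h
        simp [h, ih (i+1) (cp ++ [c])]
        rw [if_pos h']
        simp
      · have h' : ¬ ∀ x ∈ rest, x.reverse[i]? = some c := by simpa using h
        simp only [Bool.not_eq_true] at h
        simp [h, h']

theorem lcpAll_nil_left : ∀ (Rs : List (List Char)), lcpAll [] Rs = [] := by
  intro Rs
  induction Rs with
  | nil => rfl
  | cons s Rs ih => simpa [lcpAll, lcp2] using ih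

theorem lcpAll_cons_same : ∀ (Ds : List (List Char)) (c : Char) (L' : List Char),
    (∀ d ∈ Ds, d.head? = some c) →
    lcpAll (c :: L') Ds = c :: lcpAll L' (Ds.map List.tail) := by
  intro Ds
  induction Ds with
  | nil => intro c L' _; rfl
  | cons d Ds ih =>
    intro c L' h
    have hd : d = c :: d.tail :=
      List.eq_cons_of_mem_head? (l := d) (x := c) (by rw [h d (by simp)]; simp)
    rw [lcpAll, List.foldl_cons]
    conv_lhs => rw [hd]
    have : lcp2 (c :: L') (c :: d.tail) = c :: lcp2 L' d.tail := by simp [lcp2]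
    rw [this]
    simpa [lcpAll] using ih c (lcp2 L' d.tail) (fun x hx => h x (by simp [hx]))

theorem lcpAll_nil_of_bad (Ds : List (List Char)) (c : Char) (L' d : List Char)
    (hmem : d ∈ Ds) (hbad : d.head? ≠ some c) : lcpAll (c :: L') Ds = [] := by
  cases hr : lcpAll (c :: L') Ds with
  | nil => rfl
  | cons e r' =>
    have h1 : e :: r' <+: c :: L' := hr ▸ lcpAll_prefix_left Ds (c :: L')
    obtain ⟨he, -⟩ := List.cons_prefix_cons.mp h1
    have h2 : e :: r' <+: d := hr ▸ lcpAll_prefix_mem Ds (c :: L') d hmem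
    rcases h2 with ⟨t, ht⟩
    exact absurd (by rw [← ht, he]; rfl) hbad

theorem collect_eq (L : List Char) (Rs : List (List Char)) :
    ∀ (fuel i : Nat),
      collect L Rs fuel i = (lcpAll (L.drop i) (Rs.map (List.drop i))).take fuel := by
  intro fuel
  induction fuel with
  | zero => intro i; simp [collect]
  | succ fuel ih =>
    intro i
    rw [collect]
    cases hL : L[i]? with
    | none =>
      have : L.drop i = [] := by
        have h0 : (L.drop i).head? = L[i]? := List.head?_drop
        rw [hL] at h0
        exact List.head?_eq_none_iff.mp h0
      simp [this, lcpAll_nil_left]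
    | some c =>
      have hdropL : L.drop i = c :: L.drop (i+1) := by
        have h1 : (L.drop i).head? = some c := by rw [List.head?_drop, hL]
        have h2 := List.eq_cons_of_mem_head? (l := L.drop i) (x := c) (by rw [h1]; simp)
        rwa [List.tail_drop] at h2
      by_cases h : (Rs.all (fun s => s[i]? == some c)) = true
      · simp only [h, if_true]
        have hheads : ∀ d ∈ Rs.map (List.drop i), d.head? = some c := by
          intro d hd
          obtain ⟨s, hs, rfl⟩ := List.mem_map.mp hd
          rw [List.head?_drop]
          simpa using List.all_eq_true.mp h s hs
        have hm : List.map (List.tail ∘ List.drop i) Rs = List.map (List.drop (i+1)) Rs :=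
          List.map_congr_left fun s _ => by
            simp only [Function.comp_apply]; exact List.tail_drop
        rw [hdropL, lcpAll_cons_same _ c _ hheads, List.take_succ_cons, ih (i+1),
          List.map_map, hm]
      · simp only [Bool.not_eq_true] at h
        simp only [h]
        obtain ⟨s, hs, hne⟩ : ∃ s ∈ Rs, ¬ (s[i]? == some c) = true := by
          simpa using List.all_eq_false.mp h
        have hbad : (s.drop i).head? ≠ some c := by
          rw [List.head?_drop]
          simpa using hne
        rw [hdropL, lcpAll_nil_of_bad (Rs.map (List.drop i)) c _ (s.drop i)
          (List.mem_map_of_mem hs) hbad]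
        simp

theorem commonsuffixAltLoop_eq (lo hi : List Char) :
    ∀ i, commonsuffixAltLoop lo hi i = i + (lcp2 (lo.drop i) (hi.drop i)).length := by
  intro i
  induction i using commonsuffixAltLoop.induct (lo := lo) (hi := hi) with
  | case1 i h ih =>
    obtain ⟨h1, h2, h3⟩ := h
    rw [commonsuffixAltLoop, dif_pos ⟨h1, h2, h3⟩, ih]
    have hdlo : lo.drop i = lo[i] :: lo.drop (i+1) := by
      have := List.eq_cons_of_mem_head? (l := lo.drop i) (x := lo[i])
        (by rw [List.head?_drop, List.getElem?_eq_getElem h1]; rfl)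
      rwa [List.tail_drop] at this
    have hdhi : hi.drop i = lo[i] :: hi.drop (i+1) := by
      have hg : hi[i]? = some lo[i] := by rw [← h3]; simp
      have := List.eq_cons_of_mem_head? (l := hi.drop i) (x := lo[i])
        (by rw [List.head?_drop, hg]; rfl)
      rwa [List.tail_drop] at this
    rw [hdlo, hdhi]
    simp [lcp2]
    omega
  | case2 i h =>
    rw [commonsuffixAltLoop, dif_neg h]
    have : lcp2 (lo.drop i) (hi.drop i) = [] := by
      by_cases h1 : i < lo.length
      · by_cases h2 : i < hi.length
        · have h3 : ¬ lo[i]? = hi[i]? := fun hc => h ⟨h1, h2, hc⟩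
          have hdlo : lo.drop i = lo[i] :: lo.drop (i+1) := by
            have := List.eq_cons_of_mem_head? (l := lo.drop i) (x := lo[i])
              (by rw [List.head?_drop, List.getElem?_eq_getElem h1]; rfl)
            rwa [List.tail_drop] at this
          have hdhi : hi.drop i = hi[i] :: hi.drop (i+1) := by
            have := List.eq_cons_of_mem_head? (l := hi.drop i) (x := hi[i])
              (by rw [List.head?_drop, List.getElem?_eq_getElem h2]; rfl)
            rwa [List.tail_drop] at this
          have hne : lo[i] ≠ hi[i] := by
            intro hc
            exact h3 (by rw [List.getElem?_eq_getElem h1, List.getElem?_eq_getElem h2, hc])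
          rw [hdlo, hdhi]; simp [lcp2, hne]
        · have : hi.drop i = [] := List.drop_eq_nil_of_le (by omega)
          rw [this, lcp2_nil_right]
      · have : lo.drop i = [] := List.drop_eq_nil_of_le (by omega)
        rw [this]; rfl
    rw [this]
    simp

-- the two extremes of rev bound every reversed string; assemble everything
theorem main_eq (s0 : String) (rest : List String) :
    commonsuffix (s0 :: rest) = commonsuffix_alt (s0 :: rest) := by
  -- abbreviations for the reversed character lists
  set L : List Char := s0.toList.reverse with hLdef
  set Rs : List (List Char) := rest.map (fun s => s.toList.reverse) with hRsdef
  -- ===== A side =====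
  obtain ⟨m0, hm⟩ : ∃ m0, PySem.List.min?
      ((s0 :: rest).map (fun s => s.toList.length)) (fun x => x) = some m0 := by
    cases hm : PySem.List.min? ((s0 :: rest).map (fun s => s.toList.length)) (fun x => x) with
    | none => exact absurd ((PySem.List.min?_eq_none_iff _ _).mp hm) (by simp)
    | some m0 => exact ⟨m0, rfl⟩
  obtain ⟨t0, ht0mem, ht0⟩ : ∃ t ∈ s0 :: rest, t.toList.length = m0 := by
    have h := PySem.List.min?_mem hm
    obtain ⟨t, ht, he⟩ := List.mem_map.mp h
    exact ⟨t, ht, he⟩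
  have hlenle : (lcpAll L Rs).length ≤ m0 := by
    rcases List.mem_cons.mp ht0mem with rfl | hmem
    · calc (lcpAll L Rs).length ≤ L.length := (lcpAll_prefix_left Rs L).length_le
        _ = m0 := by rw [hLdef, List.length_reverse, ht0]
    · calc (lcpAll L Rs).length ≤ (t0.toList.reverse).length :=
            (lcpAll_prefix_mem Rs L t0.toList.reverse (by
              rw [hRsdef]; exact List.mem_map_of_mem hmem)).length_le
        _ = m0 := by rw [List.length_reverse, ht0]
  have hA : commonsuffix (s0 :: rest) = String.ofList ((lcpAll L Rs).reverse) := by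
    show String.ofList (commonsuffixLoop s0.toList (rest.map (fun s => s.toList))
      ((PySem.List.min? ((s0 :: rest).map (fun s => s.toList.length)) (fun x => x)).getD 0)
      0 []) = _
    rw [hm, Option.getD_some, commonsuffixLoop_eq]
    have hmaps : (rest.map (fun s => s.toList)).map List.reverse = Rs := by
      rw [List.map_map]; rfl
    rw [List.nil_append, hmaps, collect_eq]
    have hz : List.map (List.drop 0) Rs = Rs := by
      rw [show List.drop (α := Char) 0 = id from funext fun s => List.drop_zero, List.map_id]
    rw [List.drop_zero, hz, List.take_of_length_le hlenle]
  -- ===== B side =====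
  have hrev : (s0 :: rest).map (fun s => (PySem.Str.slice? s none none (-1)).getD "")
      = (s0 :: rest).map (fun s => String.ofList s.toList.reverse) :=
    List.map_congr_left fun s _ => by rw [PySem.Str.slice?_none_none_neg_one]; rfl
  obtain ⟨lo, hlo⟩ : ∃ lo, PySem.List.min?
      ((s0 :: rest).map (fun s => String.ofList s.toList.reverse)) (fun x => x) = some lo := by
    cases hm' : PySem.List.min? ((s0 :: rest).map (fun s => String.ofList s.toList.reverse))
        (fun x => x) with
    | none => exact absurd ((PySem.List.min?_eq_none_iff _ _).mp hm') (by simp)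
    | some lo => exact ⟨lo, rfl⟩
  obtain ⟨hi, hhi⟩ : ∃ hi, PySem.List.max?
      ((s0 :: rest).map (fun s => String.ofList s.toList.reverse)) (fun x => x) = some hi := by
    cases hm' : PySem.List.max? ((s0 :: rest).map (fun s => String.ofList s.toList.reverse))
        (fun x => x) with
    | none => exact absurd ((PySem.List.max?_eq_none_iff _ _).mp hm') (by simp)
    | some hi => exact ⟨hi, rfl⟩
  have hB : commonsuffix_alt (s0 :: rest) = String.ofList ((lcp2 lo.toList hi.toList).reverse) := by
    show String.ofList ((List.take (commonsuffixAltLoop _ _ 0) _).reverse) = _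
    rw [hrev, hlo, hhi]
    simp only [Option.getD_some]
    rw [commonsuffixAltLoop_eq]
    simp only [List.drop_zero, Nat.zero_add]
    congr 2
    exact (List.prefix_iff_eq_take.mp (lcp2_prefix_left lo.toList hi.toList)).symm
  rw [hA, hB]
  -- ===== the two agree =====
  -- membership of the extremes: their char lists are L or in Rs
  have hmemtoList : ∀ y ∈ (s0 :: rest).map (fun s => String.ofList s.toList.reverse),
      y.toList = L ∨ y.toList ∈ Rs := by
    intro y hy
    obtain ⟨t, ht, rfl⟩ := List.mem_map.mp hy
    rcases List.mem_cons.mp ht with rfl | ht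
    · left; rw [String.toList_ofList]
    · right; rw [String.toList_ofList]; exact List.mem_map_of_mem ht
  have hpre_of : ∀ x, x = L ∨ x ∈ Rs → lcpAll L Rs <+: x := by
    rintro x (rfl | hx)
    · exact lcpAll_prefix_left Rs _
    · exact lcpAll_prefix_mem Rs L x hx
  have h1 : lcpAll L Rs <+: lcp2 lo.toList hi.toList :=
    prefix_lcp2 _ _ _
      (hpre_of lo.toList (hmemtoList lo (PySem.List.min?_mem hlo)))
      (hpre_of hi.toList (hmemtoList hi (PySem.List.max?_mem hhi)))
  have hsand : ∀ t ∈ s0 :: rest, lcp2 lo.toList hi.toList <+: t.toList.reverse := by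
    intro t ht
    have hmem : String.ofList t.toList.reverse
        ∈ (s0 :: rest).map (fun s => String.ofList s.toList.reverse) :=
      List.mem_map_of_mem ht
    have hlos : lo ≤ String.ofList t.toList.reverse := PySem.List.min?_isMin hlo _ hmem
    have hshi : String.ofList t.toList.reverse ≤ hi := PySem.List.max?_isMax hhi _ hmem
    have hlos' : lo.toList ≤ t.toList.reverse := by
      have := String.le_iff_toList_le.mp hlos
      rwa [String.toList_ofList] at this
    have hshi' : t.toList.reverse ≤ hi.toList := by
      have := String.le_iff_toList_le.mp hshi
      rwa [String.toList_ofList] at this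
    exact sandwich _ _ _ _ (lcp2_prefix_left lo.toList hi.toList)
      (lcp2_prefix_right lo.toList hi.toList) hlos' hshi'
  have h2 : lcp2 lo.toList hi.toList <+: lcpAll L Rs := by
    refine prefix_lcpAll Rs L _ (hsand s0 (by simp)) ?_
    intro s hs
    obtain ⟨t, ht, rfl⟩ := List.mem_map.mp hs
    exact hsand t (by simp [ht])
  rw [h1.eq_of_length (Nat.le_antisymm h1.length_le h2.length_le)]

theorem commonsuffix_spec : Claim_equal_commonsuffix := by
  intro l _ hpre
  unfold Spec_commonsuffix
  match l with
  | [] => exact absurd rfl hpre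
  | s0 :: rest => exact main_eq s0 rest
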